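-- pv_equiv track=rewrite | github.com/MaximTatarenkov/Learn-Lang | web_english/text/maping_text.py | search_punctuation_indexes
-- ===== SOURCE A (Python) =====
-- def search_punctuation_indexes(excerpt):
--     punctuation_indexes = []
--     element_search = [".", "!", "?", ";"]
--     for p in element_search:
--         index = excerpt.find(p)
--         while index != -1:
--             punctuation_indexes.append(index)
--             index = excerpt.find(p, index + 1)
--     return punctuation_indexes
-- ===== SOURCE B (Python) =====
-- def search_punctuation_indexes(excerpt):
--     buckets = {}
--     for i, ch in enumerate(excerpt):
--         if ch in ".!?;":
--             buckets.setdefault(ch, []).append(i)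
--     return (buckets.get('.', []) + buckets.get('!', [])
--             + buckets.get('?', []) + buckets.get(';', []))
-- ===== Notes on version B (the rewrite author's own statement) =====
-- stated objective: alternative
-- what changed: Replaces four repeated str.find scans (one whole-string pass per mark) with a single enumerate pass that buckets indexes per mark in a dict, then concatenates the buckets in the fixed mark order; not faster in practice since str.find runs in C.
import Mathlib
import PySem

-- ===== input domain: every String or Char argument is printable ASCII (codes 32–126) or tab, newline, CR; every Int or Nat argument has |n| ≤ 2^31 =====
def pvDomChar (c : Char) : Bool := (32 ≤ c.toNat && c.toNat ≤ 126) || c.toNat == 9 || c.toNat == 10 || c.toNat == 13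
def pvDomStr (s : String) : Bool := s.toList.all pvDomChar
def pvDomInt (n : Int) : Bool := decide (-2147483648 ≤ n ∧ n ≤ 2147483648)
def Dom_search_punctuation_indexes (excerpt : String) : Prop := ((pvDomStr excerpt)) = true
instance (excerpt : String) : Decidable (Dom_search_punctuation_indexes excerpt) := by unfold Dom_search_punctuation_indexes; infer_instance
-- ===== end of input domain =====

-- B replaces A's four repeated str.find scans by one enumerate pass that buckets
-- indexes per mark in a dict and concatenates the buckets in the fixed order '.','!','?',';'.

-- ===== PORT A =====
-- A's inner 'while index != -1' loop; fuel (s.length + 1) is an upper bound on its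
-- iteration count (indices strictly increase), used only to make the recursion total.
def pvFindLoop (s p : List Char) (acc : List Int) (index : Int) : Nat → List Int
  | 0 => acc
  | fuel + 1 =>
      if index = -1 then acc
      else pvFindLoop s p (acc ++ [index]) (PySem.Chars.findFrom s p (index + 1) none) fuel

def search_punctuation_indexes (excerpt : String) : List Int :=
  let s := excerpt.toList
  let element_search : List (List Char) := [['.'], ['!'], ['?'], [';']]
  element_search.foldl
    (fun acc p => pvFindLoop s p acc (PySem.Chars.find s p) (s.length + 1)) []

-- ===== PORT B =====
def search_punctuation_indexes_alt (excerpt : String) : List Int :=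
  let buckets :=
    (PySem.List.enumerate excerpt.toList 0).foldl
      (fun d q =>
        if PySem.Chars.isIn [q.2] ['.', '!', '?', ';'] then d.modify q.2 [] (· ++ [q.1]) else d)
      (PySem.Dict.empty : PySem.Dict Char (List Int))
  buckets.getD '.' [] ++ buckets.getD '!' [] ++ buckets.getD '?' [] ++ buckets.getD ';' []

-- ===== PRECONDITION & SPEC =====
def Spec_search_punctuation_indexes (excerpt : String) (out : List Int) : Prop := out = search_punctuation_indexes_alt excerpt
instance (excerpt : String) (out : List Int) : Decidable (Spec_search_punctuation_indexes excerpt out) := by unfold Spec_search_punctuation_indexes; infer_instance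

-- ===== CLAIM (what is proved, stated in full; the proofs are below) =====
def Claim_equal_search_punctuation_indexes : Prop := ∀ (excerpt : String), Dom_search_punctuation_indexes excerpt → Spec_search_punctuation_indexes excerpt (search_punctuation_indexes excerpt)

-- ===== LEMMAS AND PROOFS =====

-- the ascending list of indexes j ≥ k (as indexes into the enumerated tail) whose char is c
def pvOcc (c : Char) (s : List Char) (k : Int) : List Int :=
  ((PySem.List.enumerate s k).filter (fun q => q.2 == c)).map (·.1)

theorem pvOcc_cons (c x : Char) (xs : List Char) (k : Int) :
    pvOcc c (x :: xs) k = if x = c then k :: pvOcc c xs (k + 1) else pvOcc c xs (k + 1) := by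
  simp [pvOcc, PySem.List.enumerate_cons]
  split_ifs with h <;> simp [h]

theorem pvOcc_of_not_mem (c : Char) (s : List Char) (k : Int) (h : c ∉ s) :
    pvOcc c s k = [] := by
  induction s generalizing k with
  | nil => rfl
  | cons x xs ih =>
      rw [pvOcc_cons]
      simp only [List.mem_cons, not_or] at h
      rw [if_neg (fun hx => h.1 hx.symm)]
      exact ih _ h.2

-- prefix [c] at position i ↔ the char at i is c
theorem pvPrefix_iff (s : List Char) (c : Char) (i : Nat) (hi : i < s.length) :
    [c] <+: s.drop i ↔ s[i] = c := by
  have hd : s.drop i = s[i] :: s.drop (i + 1) := List.drop_eq_getElem_cons hi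
  rw [hd]
  constructor
  · rintro ⟨u, hu⟩
    have h1 := congrArg List.head? hu
    simp at h1
    obtain ⟨_, h⟩ := List.getElem?_eq_some_iff.mp h1.symm
    exact h
  · rintro rfl; exact ⟨s.drop (i + 1), rfl⟩

-- if m is the first index in [k, len) with char c, pvOcc from k starts with m
theorem pvOcc_first (c : Char) (s : List Char) (m : Nat) (hm : m < s.length) (hc : s[m] = c) :
    ∀ n k, m - k = n → k ≤ m →
      (∀ i (_ : k ≤ i) (h2 : i < m), s[i]'(lt_trans h2 hm) ≠ c) →
      pvOcc c (s.drop k) k = (m : Int) :: pvOcc c (s.drop (m + 1)) ((m : Int) + 1) := by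
  intro n
  induction n with
  | zero =>
    intro k h0 hkm _
    have hkm' : k = m := by omega
    subst hkm'
    rw [List.drop_eq_getElem_cons hm, pvOcc_cons, if_pos hc]
  | succ n ih =>
    intro k h0 hkm hmin
    have hlt : k < m := by omega
    have hk : k < s.length := lt_trans hlt hm
    rw [List.drop_eq_getElem_cons hk, pvOcc_cons, if_neg (hmin k le_rfl hlt)]
    have := ih (k + 1) (by omega) (by omega) (fun i h1 h2 => hmin i (by omega) h2)
    push_cast at this ⊢
    exact this

-- the A-side while loop, started at findFrom from position k, produces acc ++ pvOcc
theorem pvFindLoop_eq (c : Char) (s : List Char) :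
    ∀ (fuel k : Nat) (acc : List Int), k ≤ s.length → s.length - k < fuel →
      pvFindLoop s [c] acc (PySem.Chars.findFrom s [c] (k : Int) none) fuel
        = acc ++ pvOcc c (s.drop k) k := by
  intro fuel
  induction fuel with
  | zero => intro k acc _ h; omega
  | succ fuel ih =>
    intro k acc hk hfuel
    by_cases hneg : PySem.Chars.findFrom s [c] (k : Int) none = -1
    · have hnm : ¬ [c] <:+: s.drop k :=
        (PySem.Chars.findFrom_natCast_eq_neg_one_iff s [c] k hk).mp hneg
      have : c ∉ s.drop k := fun hmem =>
        hnm ((List.singleton_infix_iff c (s.drop k)).mpr hmem)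
      rw [pvFindLoop, if_pos hneg, pvOcc_of_not_mem c _ _ this, List.append_nil]
    · obtain ⟨hge, hpre, hmin⟩ := PySem.Chars.findFrom_natCast_spec s [c] k hk hneg
      set j := PySem.Chars.findFrom s [c] (k : Int) none with hj
      have hj0 : 0 ≤ j := le_trans (Int.natCast_nonneg k) hge
      have hjlt : j.toNat < s.length := by
        by_contra hge'
        have : s.drop j.toNat = [] := List.drop_eq_nil_of_le (by omega)
        rw [this] at hpre
        exact absurd (List.eq_nil_of_prefix_nil hpre) (by simp)
      have hjc : s[j.toNat] = c := (pvPrefix_iff s c j.toNat hjlt).mp hpre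
      have hkj : k ≤ j.toNat := by omega
      rw [pvFindLoop, if_neg hneg]
      have hcast : j + 1 = ((j.toNat + 1 : Nat) : Int) := by omega
      rw [hcast, ih (j.toNat + 1) (acc ++ [j]) (by omega) (by omega)]
      rw [pvOcc_first c s j.toNat hjlt hjc (j.toNat - k) k rfl hkj
        (fun i h1 h2 => by
          intro hic
          exact hmin i (by omega) (by omega)
            ((pvPrefix_iff s c i (lt_trans h2 hjlt)).mpr hic))]
      have h2 : (j.toNat : Int) = j := by omega
      have h3 : ((j.toNat + 1 : Nat) : Int) = j + 1 := by omega
      rw [h2, h3]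
      simp

-- each A-side pass computes pvOcc from position 0
theorem pvPass (c : Char) (s : List Char) (acc : List Int) :
    pvFindLoop s [c] acc (PySem.Chars.find s [c]) (s.length + 1) = acc ++ pvOcc c s 0 := by
  simpa using pvFindLoop_eq c s (s.length + 1) 0 acc (Nat.zero_le _) (by omega)

-- B-side: the bucket of mark c holds exactly pvOcc c s 0
theorem pvBucket (s : List Char) (c : Char) (hc : c ∈ ['.', '!', '?', ';']) :
    ((PySem.List.enumerate s 0).foldl
      (fun d q =>
        if PySem.Chars.isIn [q.2] ['.', '!', '?', ';'] then d.modify q.2 [] (· ++ [q.1]) else d)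
      (PySem.Dict.empty : PySem.Dict Char (List Int))).getD c []
      = pvOcc c s 0 := by
  rw [PySem.List.foldl_if_eq_foldl_filter]
  have hswap : ((PySem.List.enumerate s 0).filter
        (fun q => PySem.Chars.isIn [q.2] ['.', '!', '?', ';'])).foldl
        (fun d (q : Int × Char) => d.modify q.2 [] (· ++ [q.1]))
        (PySem.Dict.empty : PySem.Dict Char (List Int))
      = (((PySem.List.enumerate s 0).filter
        (fun q => PySem.Chars.isIn [q.2] ['.', '!', '?', ';'])).map Prod.swap).foldl
        (fun d (q : Char × Int) => d.modify q.1 [] (· ++ [q.2]))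
        (PySem.Dict.empty : PySem.Dict Char (List Int)) := by
    rw [List.foldl_map]
    rfl
  rw [hswap, PySem.Dict.getD_foldl_modify_append, PySem.Dict.getD_empty, List.nil_append]
  rw [List.filter_map, List.map_map]
  rw [List.filter_filter]
  unfold pvOcc
  congr 1
  · apply List.filter_congr
    intro q _
    by_cases hq : q.2 = c
    · have hin : PySem.Chars.isIn [c] ['.', '!', '?', ';'] = true := by
        rw [PySem.Chars.isIn_iff_infix]
        exact (List.singleton_infix_iff c _).mpr hc
      simp [Prod.swap, hq, hin]
    · simp [Prod.swap, hq]

-- ===== VERDICT (by name: the statement is the Claim_ definition above) =====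
theorem search_punctuation_indexes_spec : Claim_equal_search_punctuation_indexes := by
  intro excerpt _
  unfold Spec_search_punctuation_indexes
  unfold search_punctuation_indexes search_punctuation_indexes_alt
  simp only [List.foldl_cons, List.foldl_nil]
  rw [pvPass, pvPass, pvPass, pvPass]
  rw [pvBucket _ '.' (by simp), pvBucket _ '!' (by simp),
      pvBucket _ '?' (by simp), pvBucket _ ';' (by simp)]
  simp
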